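-- pv_equiv track=rewrite | github.com/micahflee/blueleaks-explorer | src/common.py | sanitize_field_name
-- ===== SOURCE A (Python) =====
-- def sanitize_field_name(table):
--     valid_chars = "abcdefghijklmnopqrstuvwxyzABCDEFGHIJKLMNOPQRSTUVWXYZ0123456789_"
--     new_table = ""
--     for c in table:
--         if c == "-" or c == " " or c == "/" or c == ":":
--             new_table += "_"
--         elif c in valid_chars:
--             new_table += c
--     return new_table
-- ===== SOURCE B (Python) =====
-- import re
--
-- def sanitize_field_name(table):
--     s = re.sub(r'[- /:]', '_', table)
--     return re.sub(r'[^a-zA-Z0-9_]', '', s)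
-- ===== Notes on version B (the rewrite author's own statement) =====
-- stated objective: faster
-- what changed: Replaces the per-character accumulator loop with two declarative regex passes: first substitute the four separator characters with an underscore, then delete every character outside the class [a-zA-Z0-9_].
import Mathlib
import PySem

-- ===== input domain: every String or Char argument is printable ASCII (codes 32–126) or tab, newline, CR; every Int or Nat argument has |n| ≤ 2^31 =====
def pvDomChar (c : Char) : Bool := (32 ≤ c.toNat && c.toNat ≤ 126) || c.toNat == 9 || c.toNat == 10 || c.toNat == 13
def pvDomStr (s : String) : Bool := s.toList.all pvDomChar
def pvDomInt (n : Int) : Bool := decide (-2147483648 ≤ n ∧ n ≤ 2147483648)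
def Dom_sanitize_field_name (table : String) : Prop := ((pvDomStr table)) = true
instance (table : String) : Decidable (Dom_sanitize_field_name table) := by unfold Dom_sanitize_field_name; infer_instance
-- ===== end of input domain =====

-- B replaces A's per-character accumulator loop with two regex passes (replace separators, then
-- delete invalid chars); regex character classes are ported as membership in their literal char sets.


-- ===== PORT A =====
-- valid_chars = "a…zA…Z0…9_"
def pvValidChars : List Char :=
  "abcdefghijklmnopqrstuvwxyzABCDEFGHIJKLMNOPQRSTUVWXYZ0123456789_".toList

def sanitize_field_name (table : String) : String :=
  table.toList.foldl (fun new_table c =>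
    if c = '-' ∨ c = ' ' ∨ c = '/' ∨ c = ':' then new_table.push '_'
    else if pvValidChars.contains c then new_table.push c
    else new_table) ""

-- ===== PORT B =====
-- the character set of the regex class [- /:]
def pvSepChars : List Char := "- /:".toList
-- the character set of the regex class [a-zA-Z0-9_]
def pvKeepChars : List Char :=
  "abcdefghijklmnopqrstuvwxyzABCDEFGHIJKLMNOPQRSTUVWXYZ0123456789_".toList

-- pass 1: re.sub(r'[- /:]', '_', table); pass 2: re.sub(r'[^a-zA-Z0-9_]', '', s)
def sanitize_field_name_alt (table : String) : String :=
  let s := table.toList.map (fun c => if pvSepChars.contains c then '_' else c)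
  String.ofList (s.filter (fun c => pvKeepChars.contains c))

-- ===== PRECONDITION & SPEC =====
def Spec_sanitize_field_name (table : String) (out : String) : Prop := out = sanitize_field_name_alt table
instance (table : String) (out : String) : Decidable (Spec_sanitize_field_name table out) := by unfold Spec_sanitize_field_name; infer_instance

-- ===== CLAIM (what is proved, stated in full; the proofs are below) =====
def Claim_equal_sanitize_field_name : Prop := ∀ (table : String), Dom_sanitize_field_name table → Spec_sanitize_field_name table (sanitize_field_name table)

-- ===== LEMMAS AND PROOFS =====
lemma push_append_ofList (acc : String) (c : Char) (l : List Char) :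
    acc.push c ++ String.ofList l = acc ++ String.ofList (c :: l) := by
  rw [← String.toList_inj]; simp

lemma sanitize_loop (l : List Char) (acc : String) :
    (l.foldl (fun new_table c =>
      if c = '-' ∨ c = ' ' ∨ c = '/' ∨ c = ':' then new_table.push '_'
      else if pvValidChars.contains c then new_table.push c
      else new_table) acc)
    = acc ++ String.ofList ((l.map (fun c => if pvSepChars.contains c then '_' else c)).filter
        (fun c => pvKeepChars.contains c)) := by
  induction l generalizing acc with
  | nil => rw [← String.toList_inj]; simp
  | cons c t ih =>
    have hsep : pvSepChars.contains c = decide (c = '-' ∨ c = ' ' ∨ c = '/' ∨ c = ':') := by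
      simp [pvSepChars]
    by_cases h : c = '-' ∨ c = ' ' ∨ c = '/' ∨ c = ':'
    · have hkeep : pvKeepChars.contains '_' = true := by decide
      rw [List.foldl_cons, if_pos h, ih, List.map_cons, hsep]
      simp only [h, decide_true, if_true, List.filter_cons, hkeep, push_append_ofList]
    · have hck : pvKeepChars.contains c = pvValidChars.contains c := rfl
      rw [List.foldl_cons, if_neg h, List.map_cons, hsep]
      simp only [h, decide_false, Bool.false_eq_true, if_false, List.filter_cons, hck]
      by_cases hk : pvValidChars.contains c = true
      · rw [if_pos hk, if_pos hk, ih, push_append_ofList]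
      · rw [if_neg hk, if_neg hk, ih]

-- ===== VERDICT (by name: the statement is the Claim_ definition above) =====
theorem sanitize_field_name_spec : Claim_equal_sanitize_field_name := by
  intro table _
  show _ = _
  rw [sanitize_field_name, sanitize_field_name_alt, sanitize_loop]
  rw [← String.toList_inj]; simp
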